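-- pv_equiv track=rewrite | github.com/bc2026/CS334 | pa1/task3.py | encode_set
-- ===== SOURCE A (Python) =====
-- def encode_set(my_set: list, numstates: int) -> tuple:
--     # Initialize a binary string representation
--     sum_list = ['0'] * numstates
--     sum_bin = 0
--
--     for i in range(numstates):
--         if i in my_set:
--             sum_bin += (2 ** i)  # Add to the binary sum
--             sum_list[i] = '1'  # Update the list at position i to '1'
--
--     # Convert the list back to a string and reverse it
--     sum_str = ''.join(sum_list)
--
--     return (sum_str, sum_bin)
-- ===== SOURCE B (Python) =====
-- def encode_set(my_set: list, numstates: int) -> tuple: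
--     # First pass: compute the integer encoding alone.
--     sum_bin = 0
--     for i in range(numstates):
--         if i in my_set:
--             sum_bin += 2 ** i
--     # Second pass: read the string directly off the integer's binary representation
--     # (LSB first), trimmed to numstates characters.
--     sum_str = format(sum_bin, 'b').zfill(numstates)[::-1][:numstates]
--     return (sum_str, sum_bin)
-- ===== Notes on version B (the rewrite author's own statement) =====
-- stated objective: alternative
-- what changed: B computes only the integer sum in its loop and then derives the string in one shot from the integer's binary representation (format(sum_bin,'b').zfill(numstates)[::-1][:numstates]), instead of A's single loop that maintains and mutates a preallocated character list alongside the sum.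
import Mathlib
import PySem

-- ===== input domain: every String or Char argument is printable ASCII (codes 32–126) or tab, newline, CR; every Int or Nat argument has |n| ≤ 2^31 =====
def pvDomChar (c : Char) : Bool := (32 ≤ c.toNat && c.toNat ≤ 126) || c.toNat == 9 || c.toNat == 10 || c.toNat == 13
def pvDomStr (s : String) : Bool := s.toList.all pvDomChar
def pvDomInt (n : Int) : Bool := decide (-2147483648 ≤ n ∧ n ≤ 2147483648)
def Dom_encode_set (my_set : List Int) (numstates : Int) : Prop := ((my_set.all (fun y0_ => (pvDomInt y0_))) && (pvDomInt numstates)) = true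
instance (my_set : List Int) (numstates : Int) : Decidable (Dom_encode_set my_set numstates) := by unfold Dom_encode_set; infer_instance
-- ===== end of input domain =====

-- B replaces A's single loop (mutating a char list alongside the sum) by computing the
-- integer first and reading the string off its binary digits; alternative decomposition.

-- ===== PORT A =====
def encode_set (my_set : List Int) (numstates : Int) : String × Int :=
  let sum_list : List Char := PySem.List.pyRepeat ['0'] numstates
  let r := (PySem.List.pyRange 0 numstates 1).foldl
    (fun (st : List Char × Int) i =>
      if my_set.contains i then (st.1.set i.toNat '1', st.2 + 2 ^ i.toNat) else st)
    (sum_list, 0)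
  (String.mk r.1, r.2)

-- ===== PORT B =====
-- hand-port of format(x, 'b') for a nonnegative x (binary digits, MSB first; exact for x ≥ 0,
-- and B's sum_bin, a sum of powers of two, is always ≥ 0): LSB-first digits, then reversed
def pvBinLSB : Nat -> List Char
  | 0 => []
  | (m+1) => (if (m+1) % 2 == 1 then '1' else '0') :: pvBinLSB ((m+1)/2)
  decreasing_by omega

def pvFormatB (x : Nat) : List Char := if x = 0 then ['0'] else (pvBinLSB x).reverse

def encode_set_alt (my_set : List Int) (numstates : Int) : String × Int :=
  let sum_bin : Int := (PySem.List.pyRange 0 numstates 1).foldl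
    (fun s i => if my_set.contains i then s + 2 ^ i.toNat else s) 0
  let sum_str : String := String.mk (PySem.List.slice
    ((PySem.Chars.zfill (pvFormatB sum_bin.toNat) numstates).reverse) none (some numstates))
  (sum_str, sum_bin)

-- ===== PRECONDITION & SPEC =====
def Spec_encode_set (my_set : List Int) (numstates : Int) (out : String × Int) : Prop := out = encode_set_alt my_set numstates
instance (my_set : List Int) (numstates : Int) (out : String × Int) : Decidable (Spec_encode_set my_set numstates out) := by unfold Spec_encode_set; infer_instance

-- ===== CLAIM (what is proved, stated in full; the proofs are below) =====
def Claim_equal_encode_set : Prop := ∀ (my_set : List Int) (numstates : Int), Dom_encode_set my_set numstates → Spec_encode_set my_set numstates (encode_set my_set numstates)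

-- ===== LEMMAS AND PROOFS =====

-- A's fold over pairs splits into two independent folds (list part / sum part).
theorem pv_pairfold (ms : List Int) (idx : List Int) (l : List Char) (s : Int) :
    idx.foldl (fun (st : List Char × Int) i =>
        if ms.contains i then (st.1.set i.toNat '1', st.2 + 2 ^ i.toNat) else st) (l, s)
    = (idx.foldl (fun l i => if ms.contains i then l.set i.toNat '1' else l) l,
       idx.foldl (fun s i => if ms.contains i then s + 2 ^ i.toNat else s) s) := by
  induction idx generalizing l s with
  | nil => rfl
  | cons a t ih =>
    simp only [List.foldl_cons]
    by_cases h : ms.contains a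
    · rw [if_pos h, if_pos h, if_pos h]; exact ih _ _
    · rw [if_neg h, if_neg h, if_neg h]; exact ih _ _

-- the Nat-valued sum of the set contributions below n
def pvSN (ms : List Int) (n : Nat) : Nat :=
  ((List.range n).map (fun i : Nat => if ms.contains ((i : Int)) then (2 ^ i : Nat) else 0)).sum

theorem pvSN_lt (ms : List Int) (n : Nat) : pvSN ms n < 2 ^ n := by
  induction n with
  | zero => simp [pvSN]
  | succ n ih =>
    have hstep : pvSN ms (n + 1) = pvSN ms n + (if ms.contains ((n : Int)) then 2 ^ n else 0) := by
      unfold pvSN; rw [List.range_succ]; simp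
    rw [hstep]
    by_cases h : ms.contains ((n : Int))
    · rw [if_pos h, pow_succ]; omega
    · rw [if_neg h, pow_succ]; omega

-- B's sum fold computes pvSN (as an Int)
theorem pv_sumfold (ms : List Int) (n : Nat) :
    ((List.range n).map (fun k : Nat => (k : Int))).foldl
      (fun s i => if ms.contains i then s + 2 ^ i.toNat else s) 0 = (pvSN ms n : Int) := by
  have gen : ∀ (n : Nat) (s : Int), ((List.range n).map (fun k : Nat => (k : Int))).foldl
      (fun s i => if ms.contains i then s + 2 ^ i.toNat else s) s = s + (pvSN ms n : Int) := by
    intro n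
    induction n with
    | zero => intro s; simp [pvSN]
    | succ n ih =>
      intro s
      rw [List.range_succ]
      simp only [List.map_append, List.foldl_append, List.map_cons, List.map_nil,
        List.foldl_cons, List.foldl_nil, ih]
      have hstep : pvSN ms (n + 1) = pvSN ms n + (if ms.contains ((n : Int)) then 2 ^ n else 0) := by
        unfold pvSN; rw [List.range_succ]; simp
      rw [hstep]
      by_cases h : ms.contains ((n : Int))
      · rw [if_pos h, if_pos h]
        simp only [Int.toNat_natCast]
        push_cast
        ring
      · rw [if_neg h, if_neg h, Nat.add_zero]
  simpa using gen n 0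

-- the binary digit of pvSN at position j < n is the membership indicator
theorem pv_digit (ms : List Int) (n j : Nat) (hj : j < n) :
    pvSN ms n / 2 ^ j % 2 = (if ms.contains (j : Int) then 1 else 0) := by
  induction n with
  | zero => omega
  | succ n ih =>
    have hstep : pvSN ms (n + 1) = pvSN ms n + (if ms.contains (n : Int) then 2 ^ n else 0) := by
      unfold pvSN; rw [List.range_succ]; simp
    by_cases hjn : j = n
    · subst hjn
      have hlt := pvSN_lt ms j
      rw [hstep]
      by_cases h : ms.contains ((j : Int))
      · rw [if_pos h, if_pos h, Nat.add_div_right _ (Nat.two_pow_pos j), Nat.div_eq_of_lt hlt]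
      · rw [if_neg h, if_neg h, Nat.add_zero, Nat.div_eq_of_lt hlt]
    · have hj' : j < n := by omega
      rw [hstep]
      by_cases h : ms.contains (n : Int)
      · rw [if_pos h]
        have h2 : 2 ^ n = 2 ^ j * (2 * 2 ^ (n - (j + 1))) := by
          have he : 2 * 2 ^ (n - (j + 1)) = 2 ^ (n - j) := by
            rw [← pow_succ']; congr 1; omega
          rw [he, ← pow_add]; congr 1; omega
        have key : (pvSN ms n + 2 ^ n) / 2 ^ j % 2 = pvSN ms n / 2 ^ j % 2 := by
          rw [h2, Nat.add_mul_div_left _ _ (Nat.two_pow_pos j)]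
          omega
        rw [key, ih hj']
      · rw [if_neg h, Nat.add_zero, ih hj']

-- the list fold of A: result has same length and '1' exactly at processed member positions
theorem pv_listfold (ms : List Int) (n : Nat) (l : List Char) (hn : n ≤ l.length) :
    ((List.range n).map (fun k : Nat => (k : Int))).foldl
      (fun l i => if ms.contains i then l.set i.toNat '1' else l) l
    = (List.range n).map (fun j : Nat => if ms.contains ((j : Int)) then '1' else l[j]!)
        ++ l.drop n := by
  induction n generalizing l with
  | zero => simp
  | succ n ih =>
    rw [List.range_succ]
    simp only [List.map_append, List.foldl_append, List.map_cons, List.map_nil,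
      List.foldl_cons, List.foldl_nil]
    rw [ih l (by omega)]
    have hnl : n < l.length := by omega
    have hlen : ((List.range n).map (fun j : Nat => if ms.contains ((j : Int)) then '1' else l[j]!)).length = n := by
      simp
    by_cases h : ms.contains ((n : Int))
    · rw [if_pos h]
      simp only [Int.toNat_natCast]
      rw [List.set_append_right _ _ (by omega), hlen]
      have hdrop : (l.drop n).set (n - n) '1' = '1' :: l.drop (n + 1) := by
        have hd : l.drop n = l[n] :: l.drop (n + 1) := List.drop_eq_getElem_cons hnl
        rw [Nat.sub_self, hd, List.set_cons_zero]
      rw [hdrop, if_pos h, List.append_assoc, List.singleton_append]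
    · rw [if_neg h]
      have hd2 : l.drop n = l[n]! :: l.drop (n + 1) := by
        rw [getElem!_pos l n hnl]
        exact List.drop_eq_getElem_cons hnl
      rw [hd2, if_neg h, List.append_assoc, List.singleton_append]

-- zfill on a string that does not start with a sign character is plain left-padding
theorem pv_zfill_digit (c : Char) (rest : List Char) (w : Int) (h1 : c ≠ '+') (h2 : c ≠ '-') :
    PySem.Chars.zfill (c :: rest) w
      = List.replicate (w.toNat - (c :: rest).length) '0' ++ (c :: rest) := by
  unfold PySem.Chars.zfill
  by_cases h : w ≤ ((c :: rest).length : Int)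
  · rw [if_pos h, show w.toNat - (c :: rest).length = 0 by simp only [List.length_cons] at h ⊢; omega]
    simp
  · rw [if_neg h]
    simp only []
    rw [if_neg (by tauto)]

theorem pv_mem_BinLSB (x : Nat) : ∀ c ∈ pvBinLSB x, c = '0' ∨ c = '1' := by
  induction x using Nat.strong_induction_on with
  | _ x ih =>
    match x with
    | 0 => simp [pvBinLSB]
    | (m+1) =>
      intro c hc
      rw [pvBinLSB] at hc
      rcases List.mem_cons.mp hc with h | h
      · subst h
        by_cases hb : (m+1) % 2 == 1 <;> simp [hb]
      · exact ih ((m+1)/2) (by omega) c h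

theorem pv_map_zero (m : Nat) :
    (List.range m).map (fun j => if (0 : Nat) / 2 ^ j % 2 = 1 then '1' else '0')
      = List.replicate m '0' := by
  rw [List.eq_replicate_iff]
  refine ⟨by simp, ?_⟩
  intro b hb
  rcases List.mem_map.mp hb with ⟨j, -, rfl⟩
  simp

-- LSB-first binary digits, padded with zeros and truncated to n, are the n low binary digits
theorem pv_bin_take (n : Nat) : ∀ x : Nat, x < 2 ^ n →
    (pvBinLSB x ++ List.replicate (n - (pvBinLSB x).length) '0').take n
      = (List.range n).map (fun j => if x / 2 ^ j % 2 = 1 then '1' else '0') := by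
  induction n with
  | zero => intro x hx; simp
  | succ n ih =>
    intro x hx
    by_cases h0 : x = 0
    · subst h0
      rw [pv_map_zero, show pvBinLSB 0 = [] by simp [pvBinLSB], List.nil_append, List.length_nil,
        Nat.sub_zero, List.take_replicate, min_self]
    · obtain ⟨m, rfl⟩ := Nat.exists_eq_succ_of_ne_zero h0
      rw [pvBinLSB]
      simp only [List.length_cons, List.cons_append, List.take_succ_cons]
      rw [show n + 1 - ((pvBinLSB ((m+1)/2)).length + 1) = n - (pvBinLSB ((m+1)/2)).length by omega]
      have hdiv : (m + 1) / 2 < 2 ^ n := by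
        rw [Nat.div_lt_iff_lt_mul (by norm_num)]
        calc m + 1 < 2 ^ (n + 1) := hx
        _ = 2 ^ n * 2 := by rw [pow_succ]
      rw [ih ((m+1)/2) hdiv, List.range_succ_eq_map, List.map_cons, List.map_map]
      congr 1
      · simp only [pow_zero, Nat.div_one]
        by_cases hb : (m + 1) % 2 = 1
        · simp [hb]
        · simp [hb, (by omega : ¬((m+1) % 2 = 1)) ]
      · apply List.map_congr_left
        intro j hj
        simp only [Function.comp_apply]
        congr 1
        rw [Nat.div_div_eq_div_mul, ← pow_succ']

-- lifting pv_bin_take through format / zfill / reverse / take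
theorem pv_take_zfill (n x : Nat) (hx : x < 2 ^ n) :
    ((PySem.Chars.zfill (pvFormatB x) ((n : Nat) : Int)).reverse).take n
      = (List.range n).map (fun j => if x / 2 ^ j % 2 = 1 then '1' else '0') := by
  by_cases h0 : x = 0
  · subst h0
    rw [pv_map_zero, show pvFormatB 0 = ['0'] from rfl,
      pv_zfill_digit '0' [] _ (by decide) (by decide)]
    simp only [Int.toNat_natCast, List.length_cons, List.length_nil, List.reverse_append,
      List.reverse_cons, List.reverse_nil, List.nil_append, List.reverse_replicate,
      List.cons_append]
    rw [← List.replicate_succ, List.take_replicate]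
    congr 1
    omega
  · have hform : pvFormatB x = (pvBinLSB x).reverse := by simp [pvFormatB, h0]
    have hne : pvBinLSB x ≠ [] := by
      obtain ⟨m, rfl⟩ := Nat.exists_eq_succ_of_ne_zero h0
      rw [pvBinLSB]; simp
    obtain ⟨c, rest, hcr⟩ : ∃ c rest, (pvBinLSB x).reverse = c :: rest := by
      cases hrev : (pvBinLSB x).reverse with
      | nil => exact absurd (List.reverse_eq_nil_iff.mp hrev) hne
      | cons c rest => exact ⟨c, rest, rfl⟩
    have hcmem : c ∈ pvBinLSB x := by
      have : c ∈ (pvBinLSB x).reverse := by rw [hcr]; exact List.mem_cons_self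
      simpa using this
    have h01 := pv_mem_BinLSB x c hcmem
    rw [hform, hcr, pv_zfill_digit c rest _ (by rcases h01 with h|h <;> simp [h])
      (by rcases h01 with h|h <;> simp [h])]
    rw [List.reverse_append, List.reverse_replicate, ← hcr, List.reverse_reverse]
    rw [List.length_reverse, Int.toNat_natCast]
    exact pv_bin_take n x hx

-- ===== VERDICT (by name: the statement is the Claim_ definition above) =====
theorem encode_set_spec : Claim_equal_encode_set := by
  intro ms numstates _
  simp only [Spec_encode_set, encode_set, encode_set_alt]
  set n : Nat := (numstates - 0).toNat with hn
  have hr : PySem.List.pyRange 0 numstates 1 = (List.range n).map (fun k : Nat => (k : Int)) := by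
    rw [PySem.List.pyRange_one]; simp [hn]
  have hrep : PySem.List.pyRepeat ['0'] numstates = List.replicate n '0' := by
    rw [PySem.List.pyRepeat_singleton]; congr 1; omega
  rw [hr, hrep, pv_pairfold, pv_sumfold]
  rw [pv_listfold ms n (List.replicate n '0') (by simp)]
  simp only [List.drop_replicate, Nat.sub_self, List.replicate_zero, List.append_nil]
  refine Prod.ext ?_ rfl
  simp only []
  congr 1
  rw [Int.toNat_natCast]
  by_cases hpos : 0 ≤ numstates
  · rw [show numstates = ((n : Nat) : Int) by omega]
    rw [PySem.List.slice_to _ (by positivity), Int.toNat_natCast]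
    rw [pv_take_zfill n (pvSN ms n) (pvSN_lt ms n)]
    apply List.map_congr_left
    intro j hj
    rw [List.mem_range] at hj
    rw [pv_digit ms n j hj]
    by_cases h : ms.contains ((j : Int))
    · rw [if_pos h, if_pos (by rw [if_pos h])]
    · rw [if_neg h, if_neg (by rw [if_neg h]; omega)]
      simp [hj]
  · push_neg at hpos
    have hn0 : n = 0 := by omega
    rw [hn0]
    have hs0 : pvSN ms 0 = 0 := by simp [pvSN]
    rw [hs0]
    simp only [List.range_zero, List.map_nil]
    have hz : PySem.Chars.zfill (pvFormatB 0) numstates = pvFormatB 0 := by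
      unfold PySem.Chars.zfill
      rw [if_pos (by simp [pvFormatB]; omega)]
    rw [hz, show pvFormatB 0 = ['0'] from rfl]
    have hk : numstates = -(((-numstates).toNat : Nat) : Int) := by omega
    rw [hk, PySem.List.slice_to_neg_natCast _ _ (by omega)]
    simp
    omega
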